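-- pv_equiv track=rewrite | github.com/zuoweixia497/spine-triton | language/tle/core.py | _linearize_static_multidim_index
-- ===== SOURCE A (Python) =====
-- import builtins
--
-- def _linearize_static_multidim_index(index_list, src_shape, tile_shape_ints):
--     """
--     Linearize multi-dimensional static index (row-major order).
--     index_list:      List[int]  tile coordinate in each dimension
--     src_shape:       List[int]  source tensor shape in each dimension
--     tile_shape_ints: List[int]  tile size in each dimension
--     Returns a linearized scalar int
--     """
--     rank = len(src_shape)
--     if len(index_list) != rank:
--         raise ValueError(f"Index rank {len(index_list)} must match source rank {rank}")
--
--     grid = []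
--     for i in builtins.range(rank):
--         if src_shape[i] % tile_shape_ints[i] != 0:
--             raise ValueError(f"Source dim {i} ({src_shape[i]}) not divisible by tile dim ({tile_shape_ints[i]})")
--         grid.append(src_shape[i] // tile_shape_ints[i])
--
--     for i, v in builtins.enumerate(index_list):
--         if v < 0 or v >= grid[i]:
--             raise ValueError(f"Index[{i}]={v} out of bounds for grid size {grid[i]}")
--
--     # row major linearization
--     linear = 0
--     stride = 1
--     for i in builtins.reversed(builtins.range(rank)):
--         linear += index_list[i] * stride
--         stride *= grid[i]
--     return linear
-- ===== SOURCE B (Python) =====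
-- def _linearize_static_multidim_index(index_list, src_shape, tile_shape_ints):
--     """Single fused pass: per dimension, one divmod gives the grid size and the
--     divisibility remainder, the bound is checked immediately, and the linear
--     index is accumulated by Horner's rule (linear = linear*g + v)."""
--     rank = len(src_shape)
--     if len(index_list) != rank:
--         raise ValueError(f"Index rank {len(index_list)} must match source rank {rank}")
--     if len(tile_shape_ints) < rank:
--         raise IndexError("tile_shape_ints shorter than source rank")
--     linear = 0
--     for i, (v, s, t) in enumerate(zip(index_list, src_shape, tile_shape_ints)):
--         g, r = divmod(s, t)
--         if r != 0:
--             raise ValueError(f"Source dim {i} ({s}) not divisible by tile dim ({t})")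
--         if v < 0 or v >= g:
--             raise ValueError(f"Index[{i}]={v} out of bounds for grid size {g}")
--         linear = linear * g + v
--     return linear
-- ===== Notes on version B (the rewrite author's own statement) =====
-- stated objective: alternative
-- what changed: Replaces A's three separate passes (grid build, bounds check, reversed stride-accumulation loop) by a single fused forward pass that checks divisibility and bounds per dimension via divmod and accumulates the row-major index by Horner's rule.
import Mathlib
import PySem

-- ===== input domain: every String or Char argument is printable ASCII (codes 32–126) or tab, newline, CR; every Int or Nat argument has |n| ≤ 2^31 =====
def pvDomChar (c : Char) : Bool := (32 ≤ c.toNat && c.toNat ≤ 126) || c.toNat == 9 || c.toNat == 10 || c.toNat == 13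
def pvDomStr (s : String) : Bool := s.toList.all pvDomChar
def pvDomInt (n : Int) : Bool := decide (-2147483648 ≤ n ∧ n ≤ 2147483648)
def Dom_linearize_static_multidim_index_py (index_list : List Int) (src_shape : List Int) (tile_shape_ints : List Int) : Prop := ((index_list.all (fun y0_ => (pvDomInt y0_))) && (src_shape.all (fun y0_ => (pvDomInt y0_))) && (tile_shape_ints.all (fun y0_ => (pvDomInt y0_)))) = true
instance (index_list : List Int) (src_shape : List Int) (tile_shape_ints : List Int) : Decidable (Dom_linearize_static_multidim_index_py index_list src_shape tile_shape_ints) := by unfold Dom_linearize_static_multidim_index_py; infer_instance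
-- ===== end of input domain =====

-- B fuses A's three passes (grid build, bounds check, reversed stride loop) into one
-- forward pass with divmod + Horner accumulation; equivalence of the return value is
-- proved on Pre_ (the inputs on which A returns normally).

-- ===== PORT A =====
-- grid loop of A: for i in range(rank): check divisibility, append src[i] // tile[i].
-- A raise (ZeroDivisionError / ValueError / IndexError) is rendered as stopping the
-- build, detected below by a length test; all such inputs are excluded by Pre_.
def pvGridA : List Int → List Int → List Int
  | s :: ss, t :: ts =>
      if t = 0 then []                         -- ZeroDivisionError, excluded by Pre_
      else if PySem.Int.mod s t ≠ 0 then []    -- ValueError, excluded by Pre_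
      else PySem.Int.floordiv s t :: pvGridA ss ts
  | _ :: _, [] => []                           -- IndexError tile_shape_ints[i], excluded by Pre_
  | [], _ => []

-- bounds loop of A: for i, v in enumerate(index_list): v < 0 or v >= grid[i] raises
def pvBoundsA : List Int → List Int → Bool
  | v :: vs, g :: gs => if v < 0 ∨ g ≤ v then false else pvBoundsA vs gs
  | _, _ => true

def linearize_static_multidim_index_py (index_list : List Int) (src_shape : List Int) (tile_shape_ints : List Int) : Int :=
  let rank := src_shape.length
  if index_list.length ≠ rank then 0           -- ValueError (rank mismatch), excluded by Pre_
  else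
    let grid := pvGridA src_shape tile_shape_ints
    if grid.length ≠ rank then 0               -- a raise occurred inside the grid loop, excluded by Pre_
    else if ¬ pvBoundsA index_list grid then 0 -- ValueError (out of bounds), excluded by Pre_
    else
      -- linear = 0; stride = 1; for i in reversed(range(rank)): linear += index[i]*stride; stride *= grid[i]
      (((index_list.zip grid).reverse).foldl
        (fun p vg => (p.1 + vg.1 * p.2, p.2 * vg.2)) ((0 : Int), (1 : Int))).1

-- ===== PORT B =====
-- fused loop of B: for v,s,t in zip(...): g,r = divmod(s,t); check r, check bounds, linear = linear*g + v
def pvLoopB : List Int → List Int → List Int → Int → Int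
  | v :: vs, s :: ss, t :: ts, lin =>
      match PySem.Int.divmod? s t with
      | none => 0                              -- ZeroDivisionError, excluded by Pre_
      | some (g, r) =>
          if r ≠ 0 then 0                      -- ValueError (not divisible), excluded by Pre_
          else if v < 0 ∨ g ≤ v then 0         -- ValueError (out of bounds), excluded by Pre_
          else pvLoopB vs ss ts (lin * g + v)
  | _, _, _, lin => lin

def linearize_static_multidim_index_py_alt (index_list : List Int) (src_shape : List Int) (tile_shape_ints : List Int) : Int :=
  let rank := src_shape.length
  if index_list.length ≠ rank then 0           -- ValueError (rank mismatch), excluded by Pre_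
  else if tile_shape_ints.length < rank then 0 -- IndexError, excluded by Pre_
  else pvLoopB index_list src_shape tile_shape_ints 0

-- ===== PRECONDITION & SPEC =====
-- Pre_: exactly the inputs on which A returns normally — ranks match, the tile list is
-- long enough, every tile dim is nonzero and divides its source dim, and every index is
-- within its grid dimension.
def Pre_linearize_static_multidim_index_py (index_list : List Int) (src_shape : List Int) (tile_shape_ints : List Int) : Prop :=
  index_list.length = src_shape.length ∧
  src_shape.length ≤ tile_shape_ints.length ∧
  ∀ p ∈ index_list.zip (src_shape.zip tile_shape_ints),
    p.2.2 ≠ 0 ∧ PySem.Int.mod p.2.1 p.2.2 = 0 ∧ 0 ≤ p.1 ∧ p.1 < PySem.Int.floordiv p.2.1 p.2.2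
instance (index_list : List Int) (src_shape : List Int) (tile_shape_ints : List Int) : Decidable (Pre_linearize_static_multidim_index_py index_list src_shape tile_shape_ints) := by unfold Pre_linearize_static_multidim_index_py; infer_instance

def pvWitness_linearize_static_multidim_index_py : List Int × List Int × List Int := ([1, 2], [6, 12], [3, 4])

def Spec_linearize_static_multidim_index_py (index_list : List Int) (src_shape : List Int) (tile_shape_ints : List Int) (out : Int) : Prop := out = linearize_static_multidim_index_py_alt index_list src_shape tile_shape_ints
instance (index_list : List Int) (src_shape : List Int) (tile_shape_ints : List Int) (out : Int) : Decidable (Spec_linearize_static_multidim_index_py index_list src_shape tile_shape_ints out) := by unfold Spec_linearize_static_multidim_index_py; infer_instance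

-- ===== CLAIM (what is proved, stated in full; the proofs are below) =====
def Claim_equal_linearize_static_multidim_index_py : Prop := ∀ (index_list : List Int) (src_shape : List Int) (tile_shape_ints : List Int), Dom_linearize_static_multidim_index_py index_list src_shape tile_shape_ints → Pre_linearize_static_multidim_index_py index_list src_shape tile_shape_ints → Spec_linearize_static_multidim_index_py index_list src_shape tile_shape_ints (linearize_static_multidim_index_py index_list src_shape tile_shape_ints)

-- ===== LEMMAS AND PROOFS =====

-- pointwise conditions of Pre_, in recursive form convenient for induction
def pvCond : List Int → List Int → List Int → Prop
  | [], [], _ => True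
  | v :: vs, s :: ss, t :: ts =>
      t ≠ 0 ∧ PySem.Int.mod s t = 0 ∧ 0 ≤ v ∧ v < PySem.Int.floordiv s t ∧ pvCond vs ss ts
  | _, _, _ => False

theorem pvCond_of_pre (idx src tile : List Int)
    (h1 : idx.length = src.length) (h2 : src.length ≤ tile.length)
    (h3 : ∀ p ∈ idx.zip (src.zip tile),
      p.2.2 ≠ 0 ∧ PySem.Int.mod p.2.1 p.2.2 = 0 ∧ 0 ≤ p.1 ∧ p.1 < PySem.Int.floordiv p.2.1 p.2.2) :
    pvCond idx src tile := by
  induction idx generalizing src tile with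
  | nil =>
    cases src with
    | nil => trivial
    | cons s ss => simp at h1
  | cons v vs ih =>
    cases src with
    | nil => simp at h1
    | cons s ss =>
      cases tile with
      | nil => simp at h2
      | cons t ts =>
        have hh := h3 (v, s, t) (by simp)
        refine ⟨hh.1, hh.2.1, hh.2.2.1, hh.2.2.2, ?_⟩
        exact ih ss ts (by simpa using h1) (by simpa using h2)
          (fun p hp => h3 p (by simp [hp]))

theorem pvGridA_of_cond (idx src tile : List Int) (h : pvCond idx src tile) :
    pvGridA src tile = (src.zip tile).map (fun st => PySem.Int.floordiv st.1 st.2) ∧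
    (src.zip tile).length = src.length := by
  induction idx generalizing src tile with
  | nil =>
    cases src with
    | nil => simp [pvGridA]
    | cons s ss => exact absurd h (by simp [pvCond])
  | cons v vs ih =>
    cases src with
    | nil => exact absurd h (by simp [pvCond])
    | cons s ss =>
      cases tile with
      | nil => exact absurd h (by simp [pvCond])
      | cons t ts =>
        obtain ⟨ht, hm, _, _, hc⟩ := h
        obtain ⟨hg, hl⟩ := ih ss ts hc
        constructor
        · simp [pvGridA, ht, hm, hg]
        · simp [hl]

theorem pvBoundsA_of_cond (idx src tile : List Int) (h : pvCond idx src tile) :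
    pvBoundsA idx ((src.zip tile).map (fun st => PySem.Int.floordiv st.1 st.2)) = true := by
  induction idx generalizing src tile with
  | nil =>
    cases src with
    | nil => simp [pvBoundsA]
    | cons s ss => exact absurd h (by simp [pvCond])
  | cons v vs ih =>
    cases src with
    | nil => exact absurd h (by simp [pvCond])
    | cons s ss =>
      cases tile with
      | nil => exact absurd h (by simp [pvCond])
      | cons t ts =>
        obtain ⟨_, _, hv0, hvg, hc⟩ := h
        have : ¬ (v < 0 ∨ PySem.Int.floordiv s t ≤ v) := by omega
        simp [pvBoundsA, this]
        exact ih ss ts hc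

-- A's reversed stride loop, as a foldr over the (index, grid) pairs
def pvFoldA (zs : List (Int × Int)) : Int × Int :=
  zs.foldr (fun vg acc => (acc.1 + vg.1 * acc.2, acc.2 * vg.2)) ((0 : Int), (1 : Int))

theorem pvFoldA_eq (zs : List (Int × Int)) :
    ((zs.reverse).foldl (fun p vg => (p.1 + vg.1 * p.2, p.2 * vg.2)) ((0 : Int), (1 : Int))) = pvFoldA zs := by
  simp [pvFoldA, List.foldl_reverse]

-- core: B's Horner loop computes a * stride-product + A's stride sum
theorem pvLoopB_eq (idx src tile : List Int) (h : pvCond idx src tile) (a : Int) :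
    pvLoopB idx src tile a
      = a * (pvFoldA (idx.zip ((src.zip tile).map (fun st => PySem.Int.floordiv st.1 st.2)))).2
        + (pvFoldA (idx.zip ((src.zip tile).map (fun st => PySem.Int.floordiv st.1 st.2)))).1 := by
  induction idx generalizing src tile a with
  | nil =>
    cases src with
    | nil => simp [pvLoopB, pvFoldA]
    | cons s ss => exact absurd h (by simp [pvCond])
  | cons v vs ih =>
    cases src with
    | nil => exact absurd h (by simp [pvCond])
    | cons s ss =>
      cases tile with
      | nil => exact absurd h (by simp [pvCond])
      | cons t ts =>
        obtain ⟨ht, hm, hv0, hvg, hc⟩ := h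
        have hdm : PySem.Int.divmod? s t = some (PySem.Int.floordiv s t, PySem.Int.mod s t) := by
          simp [PySem.Int.divmod?, PySem.Int.floordiv, PySem.Int.mod, ht]
        have hb : ¬ (v < 0 ∨ PySem.Int.floordiv s t ≤ v) := by omega
        rw [show pvLoopB (v :: vs) (s :: ss) (t :: ts) a
              = pvLoopB vs ss ts (a * PySem.Int.floordiv s t + v) by
            simp [pvLoopB, hdm, hm, hb]]
        rw [ih ss ts hc]
        simp [pvFoldA]
        ring

-- ===== VERDICT (by name: the statement is the Claim_ definition above) =====
theorem linearize_static_multidim_index_py_spec : Claim_equal_linearize_static_multidim_index_py := by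
  intro idx src tile _ hpre
  obtain ⟨h1, h2, h3⟩ := hpre
  have hc := pvCond_of_pre idx src tile h1 h2 h3
  obtain ⟨hg, hl⟩ := pvGridA_of_cond idx src tile hc
  have hb := pvBoundsA_of_cond idx src tile hc
  unfold Spec_linearize_static_multidim_index_py
  unfold linearize_static_multidim_index_py linearize_static_multidim_index_py_alt
  simp only [hg]
  rw [if_neg (by omega), if_neg (by simp [hl]), if_neg (by simp [hb]),
      if_neg (by omega), if_neg (by omega)]
  rw [pvFoldA_eq, pvLoopB_eq idx src tile hc 0]
  ring
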